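-- pv_equiv track=rewrite | github.com/teddyjfpender/clean | scripts/roadmap/validate_capability_registry.py | validate_transitions
-- ===== SOURCE A (Python) =====
-- from typing import Dict, List, Tuple
--
-- STATE_TRANSITIONS = {
--     "planned": {"planned", "fail_fast", "implemented"},
--     "fail_fast": {"fail_fast", "implemented"},
--     "implemented": {"implemented"},
-- }
--
-- def validate_transitions(
--     old_states: Dict[str, Dict[str, str]],
--     new_states: Dict[str, Dict[str, str]],
-- ) -> List[str]:
--     errors: List[str] = []
--
--     removed = sorted(set(old_states.keys()) - set(new_states.keys()))
--     if removed:
--         errors.append(f"transition: capabilities removed without migration policy: {', '.join(removed)}")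
--
--     for cap_id in sorted(set(old_states.keys()) & set(new_states.keys())):
--         for channel in ("sierra", "cairo", "overall"):
--             old_state = old_states[cap_id][channel]
--             new_state = new_states[cap_id][channel]
--             allowed = STATE_TRANSITIONS.get(old_state, set())
--             if new_state not in allowed:
--                 errors.append(
--                     f"transition: illegal state change for {cap_id}.{channel}: {old_state} -> {new_state}"
--                 )
--
--     return errors
-- ===== SOURCE B (Python) =====
-- RANK = {"planned": 0, "fail_fast": 1, "implemented": 2}
--
--
-- def _merge_keys(ok, nk):
--     """Two-pointer merge-join of two strictly increasing key lists:
--     returns (keys only in ok, keys in both)."""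
--     removed, common = [], []
--     i = j = 0
--     while i < len(ok) and j < len(nk):
--         if ok[i] == nk[j]:
--             common.append(ok[i])
--             i += 1
--             j += 1
--         elif ok[i] < nk[j]:
--             removed.append(ok[i])
--             i += 1
--         else:
--             j += 1
--     removed.extend(ok[i:])
--     return removed, common
--
--
-- def validate_transitions(old_states, new_states):
--     removed, common = _merge_keys(sorted(old_states), sorted(new_states))
--     trans = [
--         f"transition: illegal state change for {cap}.{ch}: {o} -> {n}"
--         for cap in common
--         for ch in ("sierra", "cairo", "overall")
--         for o in (old_states[cap][ch],)
--         for n in (new_states[cap][ch],)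
--         if RANK.get(n, -1) < RANK.get(o, 3)
--     ]
--     head = (
--         ["transition: capabilities removed without migration policy: " + ", ".join(removed)]
--         if removed
--         else []
--     )
--     return head + trans
-- ===== Notes on version B (the rewrite author's own statement) =====
-- stated objective: alternative
-- what changed: Replaces A's set-difference/set-intersection passes by a two-pointer merge-join over the two sorted key lists that splits keys into removed vs common in one sweep, and replaces the allowed-transition set table by a numeric rank comparison with sentinel defaults inside a single comprehension that builds all channel errors.
import Mathlib
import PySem

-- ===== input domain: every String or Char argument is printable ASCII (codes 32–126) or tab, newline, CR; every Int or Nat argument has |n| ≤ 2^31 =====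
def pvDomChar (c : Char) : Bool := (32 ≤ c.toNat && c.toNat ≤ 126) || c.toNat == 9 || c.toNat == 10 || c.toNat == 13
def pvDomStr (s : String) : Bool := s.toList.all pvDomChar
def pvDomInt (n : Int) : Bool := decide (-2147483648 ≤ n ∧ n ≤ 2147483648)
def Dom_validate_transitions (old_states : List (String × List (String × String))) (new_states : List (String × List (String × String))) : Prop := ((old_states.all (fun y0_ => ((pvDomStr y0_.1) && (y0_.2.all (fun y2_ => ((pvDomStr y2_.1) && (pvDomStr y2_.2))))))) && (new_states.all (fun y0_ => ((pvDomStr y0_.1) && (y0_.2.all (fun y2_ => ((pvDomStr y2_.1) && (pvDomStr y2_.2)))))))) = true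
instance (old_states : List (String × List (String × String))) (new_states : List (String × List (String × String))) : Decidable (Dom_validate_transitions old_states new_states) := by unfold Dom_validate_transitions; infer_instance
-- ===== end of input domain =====

-- B replaces A's set-difference/set-intersection passes by a two-pointer merge-join of the two sorted key lists and
-- the allowed-transition set table by a rank comparison with sentinel defaults (objective: alternative, no speed claim).

-- shared helper of both ports: states[cap_id][channel]; the defaults are never reached under Pre_
-- (Python raises KeyError exactly there)
def vtState (states : List (String × List (String × String))) (cap ch : String) : String :=
  PySem.Dict.getD (PySem.Dict.mk (PySem.Dict.getD (PySem.Dict.mk states) cap [])) ch ""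

-- ===== PORT A =====
def STATE_TRANSITIONS : PySem.Dict String (PySem.Set String) :=
  PySem.Dict.mk
    [("planned", PySem.Set.ofList ["planned", "fail_fast", "implemented"]),
     ("fail_fast", PySem.Set.ofList ["fail_fast", "implemented"]),
     ("implemented", PySem.Set.ofList ["implemented"])]

def validate_transitions (old_states : List (String × List (String × String))) (new_states : List (String × List (String × String))) : List String :=
  let oldKeys := PySem.Set.ofList (old_states.map Prod.fst)
  let newKeys := PySem.Set.ofList (new_states.map Prod.fst)
  let removed := PySem.List.sorted (PySem.Set.diff oldKeys newKeys) (fun x => x)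
  let errors : List String :=
    if removed ≠ [] then
      ["transition: capabilities removed without migration policy: " ++ PySem.Str.join ", " removed]
    else []
  (PySem.List.sorted (PySem.Set.inter oldKeys newKeys) (fun x => x)).foldl
    (fun errs cap =>
      (["sierra", "cairo", "overall"] : List String).foldl
        (fun errs2 ch =>
          let o := vtState old_states cap ch
          let n := vtState new_states cap ch
          let allowed := PySem.Dict.getD STATE_TRANSITIONS o PySem.Set.empty
          if !(PySem.Set.contains allowed n) then
            errs2 ++ ["transition: illegal state change for " ++ cap ++ "." ++ ch ++ ": " ++ o ++ " -> " ++ n]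
          else errs2)
        errs)
    errors

-- ===== PORT B =====
def vtRank : PySem.Dict String Int :=
  PySem.Dict.mk [("planned", 0), ("fail_fast", 1), ("implemented", 2)]

-- RANK.get(n, -1) < RANK.get(o, 3)
def vtBad (o n : String) : Bool :=
  decide (PySem.Dict.getD vtRank n (-1) < PySem.Dict.getD vtRank o 3)

-- the two-pointer while loop of _merge_keys as the obvious structural recursion
def vtMerge : List String → List String → List String × List String
  | [], _ => ([], [])
  | o :: os, [] => (o :: os, [])
  | o :: os, n :: ns =>
    if o = n then
      let r := vtMerge os ns
      (r.1, o :: r.2)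
    else if o < n then
      let r := vtMerge os (n :: ns)
      (o :: r.1, r.2)
    else
      vtMerge (o :: os) ns
termination_by os ns => os.length + ns.length

def validate_transitions_alt (old_states : List (String × List (String × String))) (new_states : List (String × List (String × String))) : List String :=
  let rt := vtMerge (PySem.List.sorted (PySem.Set.ofList (old_states.map Prod.fst)) (fun x => x))
                    (PySem.List.sorted (PySem.Set.ofList (new_states.map Prod.fst)) (fun x => x))
  let trans := rt.2.flatMap (fun cap =>
    ((["sierra", "cairo", "overall"] : List String).filter
        (fun ch => vtBad (vtState old_states cap ch) (vtState new_states cap ch))).map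
      (fun ch => "transition: illegal state change for " ++ cap ++ "." ++ ch ++ ": " ++
        vtState old_states cap ch ++ " -> " ++ vtState new_states cap ch))
  (if rt.1 ≠ [] then
      ["transition: capabilities removed without migration policy: " ++ PySem.Str.join ", " rt.1]
    else []) ++ trans

-- ===== PRECONDITION & SPEC =====
-- Pre_ excludes exactly the inputs where Python A raises KeyError: a capability present in both dicts whose
-- per-capability dict is missing one of the channels "sierra"/"cairo"/"overall".
def Pre_validate_transitions (old_states : List (String × List (String × String))) (new_states : List (String × List (String × String))) : Prop :=
  ∀ cap ∈ old_states.map Prod.fst, (PySem.Dict.mk new_states).contains cap = true →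
    ∀ ch ∈ (["sierra", "cairo", "overall"] : List String),
      (PySem.Dict.mk (PySem.Dict.getD (PySem.Dict.mk old_states) cap [])).contains ch = true ∧
      (PySem.Dict.mk (PySem.Dict.getD (PySem.Dict.mk new_states) cap [])).contains ch = true
instance (old_states : List (String × List (String × String))) (new_states : List (String × List (String × String))) : Decidable (Pre_validate_transitions old_states new_states) := by unfold Pre_validate_transitions; infer_instance

def pvWitness_validate_transitions : (List (String × List (String × String))) × (List (String × List (String × String))) :=
  ([("evm", [("sierra", "planned"), ("cairo", "planned"), ("overall", "planned")]),
    ("gone", [("sierra", "implemented"), ("cairo", "implemented"), ("overall", "implemented")])],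
   [("evm", [("sierra", "implemented"), ("cairo", "planned"), ("overall", "fail_fast")])])

def Spec_validate_transitions (old_states : List (String × List (String × String))) (new_states : List (String × List (String × String))) (out : List String) : Prop := out = validate_transitions_alt old_states new_states
instance (old_states : List (String × List (String × String))) (new_states : List (String × List (String × String))) (out : List String) : Decidable (Spec_validate_transitions old_states new_states out) := by unfold Spec_validate_transitions; infer_instance

-- ===== CLAIM (what is proved, stated in full; the proofs are below) =====
def Claim_equal_validate_transitions : Prop := ∀ (old_states : List (String × List (String × String))) (new_states : List (String × List (String × String))), Dom_validate_transitions old_states new_states → Pre_validate_transitions old_states new_states → Spec_validate_transitions old_states new_states (validate_transitions old_states new_states)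

-- ===== LEMMAS AND PROOFS =====

theorem vt_get?_nil {ν : Type} (k : String) : (PySem.Dict.mk ([] : List (String × ν))).get? k = none := rfl

-- sorting a filtered set = filtering the sorted set
theorem vt_sorted_filter (xs : List String) (q : String → Bool) :
    PySem.List.sorted ((PySem.Set.ofList xs).filter q) (fun x => x) =
      (PySem.List.sorted (PySem.Set.ofList xs) (fun x => x)).filter q := by
  apply PySem.List.sorted_eq_of_perm_of_pairwise_lt
  · exact (PySem.List.sorted_perm (PySem.Set.ofList xs) (fun x => x) false).filter q
  · exact (PySem.List.sorted_ofList_pairwise_lt xs).filter q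

-- membership in the sorted set list is membership in the set
theorem vt_contains_sorted (xs : List String) (c : String) :
    (PySem.List.sorted (PySem.Set.ofList xs) (fun x => x)).contains c =
      PySem.Set.contains (PySem.Set.ofList xs) c := by
  apply Bool.eq_iff_iff.mpr
  simp [List.contains_iff_mem, PySem.Set.contains,
    (PySem.List.sorted_perm (PySem.Set.ofList xs) (fun x => x) false).mem_iff,
    List.any_eq_true, beq_iff_eq]

-- A's allowed-set membership test IS the negation of B's rank test
theorem vt_contains_eq_bad (o n : String) :
    PySem.Set.contains (PySem.Dict.getD STATE_TRANSITIONS o PySem.Set.empty) n = !vtBad o n := by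
  by_cases h1 : o = "planned"
  · subst h1
    by_cases g1 : n = "planned"; · subst g1; decide
    by_cases g2 : n = "fail_fast"; · subst g2; decide
    by_cases g3 : n = "implemented"; · subst g3; decide
    simp [STATE_TRANSITIONS, vtRank, vtBad, PySem.Dict.getD, PySem.Dict.get?_mk_cons, vt_get?_nil,
      PySem.Set.contains, beq_iff_eq, g1, g2, g3, Ne.symm g1, Ne.symm g2, Ne.symm g3]
  · by_cases h2 : o = "fail_fast"
    · subst h2
      by_cases g1 : n = "planned"; · subst g1; decide
      by_cases g2 : n = "fail_fast"; · subst g2; decide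
      by_cases g3 : n = "implemented"; · subst g3; decide
      simp [STATE_TRANSITIONS, vtRank, vtBad, PySem.Dict.getD, PySem.Dict.get?_mk_cons, vt_get?_nil,
        PySem.Set.contains, beq_iff_eq, g1, g2, g3, Ne.symm g1, Ne.symm g2, Ne.symm g3]
    · by_cases h3 : o = "implemented"
      · subst h3
        by_cases g1 : n = "planned"; · subst g1; decide
        by_cases g2 : n = "fail_fast"; · subst g2; decide
        by_cases g3 : n = "implemented"; · subst g3; decide
        simp [STATE_TRANSITIONS, vtRank, vtBad, PySem.Dict.getD, PySem.Dict.get?_mk_cons, vt_get?_nil,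
          PySem.Set.contains, beq_iff_eq, g1, g2, g3, Ne.symm g1, Ne.symm g2, Ne.symm g3]
      · simp only [STATE_TRANSITIONS, vtRank, vtBad, PySem.Dict.getD, PySem.Dict.get?_mk_cons,
          vt_get?_nil, beq_iff_eq, Ne.symm h1, Ne.symm h2, Ne.symm h3, if_neg, if_false,
          PySem.Set.empty, PySem.Set.contains, List.any_nil, Option.getD_none, Bool.false_eq,
          Bool.not_eq_false', decide_eq_true_eq]
        split_ifs <;> norm_num

-- the per-capability error block shared by both proofs (B's flatMap body, literally)
def vtCapErr (old_states new_states : List (String × List (String × String))) (cap : String) : List String :=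
  ((["sierra", "cairo", "overall"] : List String).filter
      (fun ch => vtBad (vtState old_states cap ch) (vtState new_states cap ch))).map
    (fun ch => "transition: illegal state change for " ++ cap ++ "." ++ ch ++ ": " ++
      vtState old_states cap ch ++ " -> " ++ vtState new_states cap ch)

-- A's nested loops over the common capabilities, characterised
theorem vt_loopA (old_states new_states : List (String × List (String × String)))
    (C : List String) (init : List String) :
    C.foldl
      (fun errs cap =>
        (["sierra", "cairo", "overall"] : List String).foldl
          (fun errs2 ch =>
            let o := vtState old_states cap ch
            let n := vtState new_states cap ch
            let allowed := PySem.Dict.getD STATE_TRANSITIONS o PySem.Set.empty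
            if !(PySem.Set.contains allowed n) then
              errs2 ++ ["transition: illegal state change for " ++ cap ++ "." ++ ch ++ ": " ++ o ++ " -> " ++ n]
            else errs2)
          errs)
      init =
    init ++ C.flatMap (vtCapErr old_states new_states) := by
  rw [PySem.List.foldl_congr_mem C _ (fun errs cap => errs ++ vtCapErr old_states new_states cap)]
  · exact PySem.List.foldl_append_eq_flatMap _ C init
  · intro acc cap _
    simp only [vt_contains_eq_bad, Bool.not_not]
    exact PySem.List.foldl_append_if _ _ _ acc

-- the merge-join of two strictly increasing lists splits the first into (not in second, in second)
theorem vtMerge_eq (ok nk : List String) (ho : ok.Pairwise (· < ·)) (hn : nk.Pairwise (· < ·)) :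
    vtMerge ok nk = (ok.filter (fun c => !(nk.contains c)), ok.filter (fun c => nk.contains c)) := by
  induction ok, nk using vtMerge.induct with
  | case1 nk => simp [vtMerge]
  | case2 o os => simp [vtMerge]
  | case3 os n ns ih =>
    rw [List.pairwise_cons] at ho hn
    have ihr := ih ho.2 hn.2
    have hcongr : ∀ x ∈ os, ((n :: ns).contains x) = (ns.contains x) := by
      intro x hx
      have hlt : n < x := ho.1 x hx
      have hne : x ≠ n := fun h => absurd (h ▸ hlt) (lt_irrefl x)
      simp [List.contains_cons, hne]
    have hc1 : List.filter (fun c => !(n :: ns).contains c) os =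
        List.filter (fun c => !ns.contains c) os :=
      List.filter_congr (fun x hx => by rw [hcongr x hx])
    have hc2 : List.filter (fun c => (n :: ns).contains c) os =
        List.filter (fun c => ns.contains c) os :=
      List.filter_congr (fun x hx => by rw [hcongr x hx])
    have hcn : ((n :: ns).contains n) = true := by simp [List.contains_cons]
    rw [vtMerge, if_pos rfl, ihr, List.filter_cons, List.filter_cons, hc1, hc2]
    simp [hcn]
  | case4 o os n ns hne hlt ih =>
    rw [List.pairwise_cons] at ho
    have ihr := ih ho.2 hn
    have hno : ((n :: ns).contains o) = false := by
      rw [List.pairwise_cons] at hn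
      have hnm : o ∉ ns := fun hy => absurd (lt_trans hlt (hn.1 o hy)) (lt_irrefl o)
      simp only [List.contains_cons, Bool.or_eq_false_iff]
      exact ⟨by simp [hne], by simpa using hnm⟩
    rw [vtMerge, if_neg hne, if_pos hlt, ihr, List.filter_cons, List.filter_cons]
    simp only [hno, Bool.not_false, if_pos rfl, Bool.false_eq_true, if_false]
    simp only [List.contains_eq_mem, List.mem_cons, decide_eq_false_iff_not, not_or,
      Bool.not_eq_true', decide_eq_true_eq] at hno ⊢
    simp [hno]
  | case5 o os n ns hne hnlt ih =>
    have hno : n < o := by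
      rcases lt_trichotomy o n with h | h | h
      · exact absurd h hnlt
      · exact absurd h hne
      · exact h
    rw [List.pairwise_cons] at hn
    have ihr := ih ho hn.2
    have hcongr : ∀ x ∈ o :: os, ((n :: ns).contains x) = (ns.contains x) := by
      intro x hx
      have hno' : n < x := by
        rcases List.mem_cons.mp hx with h | h
        · exact h ▸ hno
        · exact lt_trans hno ((List.pairwise_cons.mp ho).1 x h)
      have hne' : x ≠ n := fun h => absurd (h ▸ hno') (lt_irrefl n)
      simp [List.contains_cons, hne']
    have hc1 : List.filter (fun c => !(n :: ns).contains c) (o :: os) =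
        List.filter (fun c => !ns.contains c) (o :: os) :=
      List.filter_congr (fun x hx => by rw [hcongr x hx])
    have hc2 : List.filter (fun c => (n :: ns).contains c) (o :: os) =
        List.filter (fun c => ns.contains c) (o :: os) :=
      List.filter_congr (fun x hx => by rw [hcongr x hx])
    rw [vtMerge, if_neg hne, if_neg hnlt, ihr, hc1, hc2]

-- ===== VERDICT (by name: the statement is the Claim_ definition above) =====
theorem validate_transitions_spec : Claim_equal_validate_transitions := by
  intro old_states new_states _ _
  unfold Spec_validate_transitions
  simp only [validate_transitions, validate_transitions_alt, PySem.Set.diff, PySem.Set.inter]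
  rw [vt_loopA old_states new_states]
  rw [vtMerge_eq _ _ (PySem.List.sorted_ofList_pairwise_lt _) (PySem.List.sorted_ofList_pairwise_lt _)]
  simp only [vt_contains_sorted]
  rw [vt_sorted_filter (old_states.map Prod.fst)
        (fun x => !(PySem.Set.contains (PySem.Set.ofList (new_states.map Prod.fst)) x)),
      vt_sorted_filter (old_states.map Prod.fst)
        (fun x => PySem.Set.contains (PySem.Set.ofList (new_states.map Prod.fst)) x)]
  rfl
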